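-- pv_equiv track=rewrite | github.com/tomasz-solis/trackside-labs | src/extractors/performance.py | _find_session
-- ===== SOURCE A (Python) =====
-- from typing import Dict, Optional
--
-- def _find_session(sessions: Dict, session_name: str) -> Optional[Dict]:
--     """
--     Find session that matches name with flexible matching.
--
--     Handles variations like:
--     - 'fp1' matches 'bahrain_grand_prix_fp1'
--     - 'sprint_quali' matches 'miami_grand_prix_sprint_qualifying'
--     - 'fp2' matches 'bahrain_fp2'
--     """
--     # Direct match
--     if session_name in sessions:
--         return sessions[session_name]
--
--     # Normalize session name for flexible matching
--     session_normalized = session_name.lower().replace('_', '').replace(' ', '')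
--
--     # Try exact suffix match first
--     suffix = f'_{session_name}'
--     for key, data in sessions.items():
--         if key.endswith(suffix):
--             return data
--
--     # Flexible match: check if normalized session name is in key
--     # This handles 'sprint_quali' matching 'sprint_qualifying'
--     for key, data in sessions.items():
--         key_normalized = key.lower().replace('_', '').replace(' ', '')
--         if session_normalized in key_normalized:
--             # Make sure it's actually the session type, not just coincidence
--             # Check if it ends with the session pattern
--             if key_normalized.endswith(session_normalized):
--                 return data
--
--     return None
-- ===== SOURCE B (Python) =====
-- from typing import Dict, Optional
--
-- def _find_session(sessions: Dict, session_name: str) -> Optional[Dict]: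
--     """Single pass: rank each key by match priority (exact < suffix < normalized
--     suffix) and keep the earliest key with the best priority seen."""
--     norm = session_name.lower().replace('_', '').replace(' ', '')
--     suffix = '_' + session_name
--     best = None  # (priority, data)
--     for key, data in sessions.items():
--         if key == session_name:
--             return data  # exact match always wins
--         elif key.endswith(suffix):
--             p = 1
--         elif key.lower().replace('_', '').replace(' ', '').endswith(norm):
--             p = 2
--         else:
--             continue
--         if best is None or p < best[0]:
--             best = (p, data)
--     return best[1] if best is not None else None
-- ===== Notes on version B (the rewrite author's own statement) =====
-- stated objective: alternative
-- what changed: Replaced A's three sequential scans (exact lookup, suffix scan, normalized-suffix scan) with a single pass over the items that ranks each key by match priority and keeps the earliest key with the best priority; the redundant substring check before the normalized endswith test is dropped.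
import Mathlib
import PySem

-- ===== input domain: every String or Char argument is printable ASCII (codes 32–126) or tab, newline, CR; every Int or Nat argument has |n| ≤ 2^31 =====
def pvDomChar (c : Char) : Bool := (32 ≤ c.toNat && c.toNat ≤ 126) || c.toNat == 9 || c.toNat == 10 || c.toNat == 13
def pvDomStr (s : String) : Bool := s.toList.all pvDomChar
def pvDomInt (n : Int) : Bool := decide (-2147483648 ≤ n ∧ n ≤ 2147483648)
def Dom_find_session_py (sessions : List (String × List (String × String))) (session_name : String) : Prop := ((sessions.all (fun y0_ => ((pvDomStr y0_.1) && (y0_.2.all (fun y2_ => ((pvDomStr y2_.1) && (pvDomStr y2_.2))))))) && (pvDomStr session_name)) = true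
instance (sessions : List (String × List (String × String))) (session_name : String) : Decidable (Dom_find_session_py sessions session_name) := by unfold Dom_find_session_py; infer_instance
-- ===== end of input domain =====

-- B replaces A's three sequential scans with one best-priority pass; objective: alternative (same cost).
-- s.lower().replace('_','').replace(' ','')  (used verbatim by both Pythons)
def pvNorm (s : String) : String :=
  PySem.Str.replace (PySem.Str.replace (PySem.Str.lower s) "_" "") " " ""

-- ===== PORT A =====
def find_session_py (sessions : List (String × List (String × String))) (session_name : String) : Option (List (String × String)) :=
  -- if session_name in sessions: return sessions[session_name]  (dict = assoc list, first match)
  match sessions.find? (fun kv => kv.1 == session_name) with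
  | some kv => some kv.2
  | none =>
    let session_normalized := pvNorm session_name
    let suffix := "_" ++ session_name
    -- first loop: exact suffix match
    match sessions.find? (fun kv => PySem.Str.endswith kv.1 suffix) with
    | some kv => some kv.2
    | none =>
      -- second loop: normalized containment + endswith
      match sessions.find? (fun kv =>
          let key_normalized := pvNorm kv.1
          PySem.Str.isIn session_normalized key_normalized
            && PySem.Str.endswith key_normalized session_normalized) with
      | some kv => some kv.2
      | none => none

-- ===== PORT B =====
-- the single best-priority pass of Source B (exact match returns immediately)
def find_session_alt_loop (session_name suffix norm : String) :
    List (String × List (String × String)) → Option (Nat × List (String × String)) →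
    Option (List (String × String))
  | [], best => best.map (·.2)
  | (key, data) :: rest, best =>
    if key == session_name then some data
    else
      let p? : Option Nat :=
        if PySem.Str.endswith key suffix then some 1
        else if PySem.Str.endswith (pvNorm key) norm then some 2
        else none
      match p? with
      | none => find_session_alt_loop session_name suffix norm rest best
      | some p =>
        match best with
        | none => find_session_alt_loop session_name suffix norm rest (some (p, data))
        | some (bp, bd) =>
          if p < bp then find_session_alt_loop session_name suffix norm rest (some (p, data))
          else find_session_alt_loop session_name suffix norm rest (some (bp, bd))

def find_session_py_alt (sessions : List (String × List (String × String))) (session_name : String) : Option (List (String × String)) :=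
  find_session_alt_loop session_name ("_" ++ session_name) (pvNorm session_name) sessions none

-- ===== PRECONDITION & SPEC =====
def Spec_find_session_py (sessions : List (String × List (String × String))) (session_name : String) (out : Option (List (String × String))) : Prop := out = find_session_py_alt sessions session_name
instance (sessions : List (String × List (String × String))) (session_name : String) (out : Option (List (String × String))) : Decidable (Spec_find_session_py sessions session_name out) := by unfold Spec_find_session_py; infer_instance

-- ===== CLAIM (what is proved, stated in full; the proofs are below) =====
def Claim_equal_find_session_py : Prop := ∀ (sessions : List (String × List (String × String))) (session_name : String), Dom_find_session_py sessions session_name → Spec_find_session_py sessions session_name (find_session_py sessions session_name)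

-- ===== LEMMAS AND PROOFS =====

-- endswith implies containment, so A's 'norm in key_norm and key_norm.endswith(norm)' is just the endswith test
lemma pv_isIn_and_endswith (sub s : String) :
    (PySem.Str.isIn sub s && PySem.Str.endswith s sub) = PySem.Str.endswith s sub := by
  by_cases h : PySem.Chars.endswith s.toList sub.toList = true
  · have hin : PySem.Chars.isIn sub.toList s.toList = true := by
      rw [PySem.Chars.isIn_iff_infix]
      exact ((PySem.Chars.endswith_iff _ _).mp h).isInfix
    simp [h, hin]
  · simp [h]

-- characterization of the best-priority pass for every reachable accumulator
lemma alt_loop_spec (session_name suffix norm : String) :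
    ∀ (l : List (String × List (String × String))) (best : Option (Nat × List (String × String))),
    (∀ x, best = some x → x.1 ≤ 2) →
    find_session_alt_loop session_name suffix norm l best =
      match l.find? (fun kv => kv.1 == session_name) with
      | some kv => some kv.2
      | none =>
        match best with
        | some (bp, bd) =>
          if bp ≤ 1 then some bd
          else
            match l.find? (fun kv => PySem.Str.endswith kv.1 suffix) with
            | some kv => some kv.2
            | none => some bd
        | none =>
          match l.find? (fun kv => PySem.Str.endswith kv.1 suffix) with
          | some kv => some kv.2
          | none =>
            match l.find? (fun kv => PySem.Str.endswith (pvNorm kv.1) norm) with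
            | some kv => some kv.2
            | none => none := by
  intro l
  induction l with
  | nil =>
    intro best hb
    rcases best with _ | ⟨bp, bd⟩
    · simp [find_session_alt_loop]
    · by_cases h : bp ≤ 1 <;> simp [find_session_alt_loop, h]
  | cons hd tl ih =>
    intro best hb
    obtain ⟨key, data⟩ := hd
    have ih1 := fun d => ih (some (1, d)) (by intro x hx; cases hx; simp)
    have ih2 := fun d => ih (some (2, d)) (by intro x hx; cases hx; simp)
    have ihn := ih none (by intro x hx; cases hx)
    by_cases h0 : (key == session_name) = true
    · rcases best with _ | ⟨bp, bd⟩ <;>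
        simp [find_session_alt_loop, h0]
    · by_cases h1 : PySem.Chars.endswith key.toList suffix.toList = true
      · rcases best with _ | ⟨bp, bd⟩
        · simp [find_session_alt_loop, h0, h1, ih1]
        · by_cases hbp : bp ≤ 1
          · have h1b : ¬ (1 : Nat) < bp := by omega
            simp [find_session_alt_loop, h0, h1, h1b, hbp,
              ih (some (bp, bd)) (hb)]
          · have h1b : (1 : Nat) < bp := by omega
            simp [find_session_alt_loop, h0, h1, h1b, hbp, ih1]
      · by_cases h2 : PySem.Chars.endswith (pvNorm key).toList norm.toList = true
        · rcases best with _ | ⟨bp, bd⟩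
          · simp [find_session_alt_loop, h0, h1, h2, ih2]
          · have hble : bp ≤ 2 := hb _ rfl
            have h2b : ¬ (2 : Nat) < bp := by omega
            by_cases hbp : bp ≤ 1
            · simp [find_session_alt_loop, h0, h1, h2, h2b, hbp,
                ih (some (bp, bd)) (by intro x hx; cases hx; simpa)]
            · simp [find_session_alt_loop, h0, h1, h2, h2b, hbp,
                ih (some (bp, bd)) (by intro x hx; cases hx; simpa)]
        · rcases best with _ | ⟨bp, bd⟩
          · simp [find_session_alt_loop, h0, h1, h2, ihn]
          · simp [find_session_alt_loop, h0, h1, h2,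
              ih (some (bp, bd)) (hb)]

-- ===== VERDICT (by name: the statement is the Claim_ definition above) =====
theorem find_session_py_spec : Claim_equal_find_session_py := by
  intro sessions session_name _
  unfold Spec_find_session_py find_session_py find_session_py_alt
  rw [alt_loop_spec _ _ _ _ none (by intro x hx; cases hx)]
  have hc : (fun kv : String × List (String × String) =>
        PySem.Str.isIn (pvNorm session_name) (pvNorm kv.1)
          && PySem.Str.endswith (pvNorm kv.1) (pvNorm session_name))
      = (fun kv => PySem.Str.endswith (pvNorm kv.1) (pvNorm session_name)) := by
    funext kv; exact pv_isIn_and_endswith _ _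
  simp only [hc]
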